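-- pv_equiv track=rewrite | github.com/jamarju/vic20-sargon-ii-chess | helpers/annotate_vars.py | resolve_abs
-- ===== SOURCE A (Python) =====
-- ABS_BASES = {
--     0x0200: 'input_buf',
--     0x033c: 'notation_buf',
--     0x1000: 'pv_buffer',
--     0x1001: 'move_list',
--     0x12fe: 'move_history',
--     0x1319: 'exch_packed',
--     0x1327: 'capture_stk',
--     0x1328: 'captured',
--     0x1331: 'flags_stk',
--     0x1332: 'move_flags',
--     0x133b: 'ply_idx_stk',
--     0x1346: 'exch_squares',
--     0x13c6: 'exch_sources',
--     0x1445: 'killer_from',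
--     0x144f: 'killer_to',
--     0x1459: 'ply_list_lo',
--     0x145b: 'root_alloc_lo',
--     0x1463: 'ply_list_hi',
--     0x1465: 'root_alloc_hi',
--     0x146e: 'board',
-- }
--
-- def resolve_abs(addr):
--     """Given an absolute address, return symbolic name or base+offset."""
--     if addr in ABS_BASES:
--         return ABS_BASES[addr]
--     # Find the closest base that's <= addr
--     best_base = None
--     best_offset = None
--     for base_addr, base_name in sorted(ABS_BASES.items()):
--         if base_addr <= addr:
--             offset = addr - base_addr
--             if offset <= 32:  # only use offsets up to 32
--                 if best_base is None or base_addr > best_base: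
--                     best_base = base_addr
--                     best_offset = offset
--     if best_base is not None and best_offset > 0:
--         name = ABS_BASES[best_base]
--         return f"{name}+{best_offset}"
--     # Check if addr is 1 below a base (negative offset)
--     for base_addr, base_name in ABS_BASES.items():
--         if addr == base_addr - 1:
--             return f"{base_name}-1"
--     return None
-- ===== SOURCE B (Python) =====
-- ABS_BASES = {
--     0x0200: 'input_buf',
--     0x033c: 'notation_buf',
--     0x1000: 'pv_buffer',
--     0x1001: 'move_list',
--     0x12fe: 'move_history',
--     0x1319: 'exch_packed',
--     0x1327: 'capture_stk',
--     0x1328: 'captured',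
--     0x1331: 'flags_stk',
--     0x1332: 'move_flags',
--     0x133b: 'ply_idx_stk',
--     0x1346: 'exch_squares',
--     0x13c6: 'exch_sources',
--     0x1445: 'killer_from',
--     0x144f: 'killer_to',
--     0x1459: 'ply_list_lo',
--     0x145b: 'root_alloc_lo',
--     0x1463: 'ply_list_hi',
--     0x1465: 'root_alloc_hi',
--     0x146e: 'board',
-- }
--
-- _SORTED_BASES = sorted(ABS_BASES)
--
-- def resolve_abs(addr):
--     """Given an absolute address, return symbolic name or base+offset."""
--     name = ABS_BASES.get(addr)
--     if name is not None:
--         return name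
--     # binary search for the closest base <= addr
--     lo, hi = 0, len(_SORTED_BASES)
--     while lo < hi:
--         mid = (lo + hi) // 2
--         if _SORTED_BASES[mid] <= addr:
--             lo = mid + 1
--         else:
--             hi = mid
--     if lo > 0:
--         offset = addr - _SORTED_BASES[lo - 1]
--         if 0 < offset <= 32:
--             return f"{ABS_BASES[_SORTED_BASES[lo - 1]]}+{offset}"
--     if addr + 1 in ABS_BASES:
--         return f"{ABS_BASES[addr + 1]}-1"
--     return None
-- ===== Notes on version B (the rewrite author's own statement) =====
-- stated objective: simpler
-- what changed: Replaces A's linear max-tracking scan over all sorted (base,name) items and the second linear scan for addr==base-1 by a precomputed sorted base list with a hand-written binary search for the closest base <= addr, plus a direct membership test on addr+1.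
import Mathlib
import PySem

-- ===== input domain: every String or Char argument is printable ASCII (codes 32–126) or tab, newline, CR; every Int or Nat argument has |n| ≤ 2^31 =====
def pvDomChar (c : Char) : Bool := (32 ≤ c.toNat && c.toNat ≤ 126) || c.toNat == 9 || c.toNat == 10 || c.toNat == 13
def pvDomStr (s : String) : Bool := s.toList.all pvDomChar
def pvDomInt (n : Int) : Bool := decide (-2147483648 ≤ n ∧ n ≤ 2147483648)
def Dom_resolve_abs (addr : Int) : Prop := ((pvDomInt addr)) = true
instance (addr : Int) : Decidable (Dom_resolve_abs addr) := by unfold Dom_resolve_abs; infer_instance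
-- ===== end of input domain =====

-- B replaces A's linear max-tracking scan over sorted items by a hand-written binary
-- search over a precomputed sorted base list plus a direct addr+1 membership test (objective: simpler).

-- ===== PORT A =====
def absBases : PySem.Dict Int String := PySem.Dict.ofList [
  (0x0200, "input_buf"), (0x033c, "notation_buf"), (0x1000, "pv_buffer"),
  (0x1001, "move_list"), (0x12fe, "move_history"), (0x1319, "exch_packed"),
  (0x1327, "capture_stk"), (0x1328, "captured"), (0x1331, "flags_stk"),
  (0x1332, "move_flags"), (0x133b, "ply_idx_stk"), (0x1346, "exch_squares"),
  (0x13c6, "exch_sources"), (0x1445, "killer_from"), (0x144f, "killer_to"),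
  (0x1459, "ply_list_lo"), (0x145b, "root_alloc_lo"), (0x1463, "ply_list_hi"),
  (0x1465, "root_alloc_hi"), (0x146e, "board")]

-- one step of A's 'for base_addr, base_name in sorted(ABS_BASES.items())' loop over (best_base, best_offset)
def aStep (addr : Int) (best : Option Int × Option Int) (p : Int × String) : Option Int × Option Int :=
  if p.1 ≤ addr then
    (if addr - p.1 ≤ 32 then
      (match best.1 with
       | none => (some p.1, some (addr - p.1))
       | some bb => if bb < p.1 then (some p.1, some (addr - p.1)) else best)
    else best)
  else best

-- A's second loop: first base with addr == base_addr - 1 (early return)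
def aNegScan (addr : Int) : Option String :=
  absBases.items.findSome? (fun p => if addr = p.1 - 1 then some (p.2 ++ "-1") else none)

-- sorted(ABS_BASES.items()): keys are distinct, so Python's tuple order is the key order
def resolve_abs (addr : Int) : Option String :=
  if absBases.contains addr then absBases.get? addr
  else
    match (PySem.List.sorted absBases.items (fun p => p.1) false).foldl (aStep addr) (none, none) with
    | (some bb, some bo) =>
        if 0 < bo then some ((absBases.get? bb).getD "" ++ "+" ++ PySem.Int.toStr bo)
        else aNegScan addr
    | _ => aNegScan addr

-- ===== PORT B =====
-- _SORTED_BASES = sorted(ABS_BASES)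
def sortedBases : List Int := PySem.List.sorted absBases.keys (fun x => x) false

-- B's 'while lo < hi' binary search; lo, hi stay in 0..len so Nat // equals Python //
-- and the index mid is always in range (the getD default is unreachable)
-- the while loop, with a fuel counter bounding the remaining iterations (hi - lo shrinks each turn)
def bsearchGo (addr : Int) (fuel lo hi : Nat) : Nat :=
  match fuel with
  | 0 => lo
  | fuel + 1 =>
    if lo < hi then
      -- mid = (lo + hi) // 2, inlined
      if sortedBases.getD ((lo + hi) / 2) 0 ≤ addr then bsearchGo addr fuel ((lo + hi) / 2 + 1) hi
      else bsearchGo addr fuel lo ((lo + hi) / 2)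
    else lo

def bsearchLoop (addr : Int) (lo hi : Nat) : Nat := bsearchGo addr (hi - lo) lo hi

def bNegCheck (addr : Int) : Option String :=
  if absBases.contains (addr + 1) then some ((absBases.get? (addr + 1)).getD "" ++ "-1") else none

def resolve_abs_alt (addr : Int) : Option String :=
  match absBases.get? addr with
  | some name => some name
  | none =>
    let lo := bsearchLoop addr 0 sortedBases.length
    if 0 < lo then
      let base := sortedBases.getD (lo - 1) 0
      let offset := addr - base
      if 0 < offset ∧ offset ≤ 32 then
        some ((absBases.get? base).getD "" ++ "+" ++ PySem.Int.toStr offset)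
      else bNegCheck addr
    else bNegCheck addr

-- ===== PRECONDITION & SPEC =====
def Spec_resolve_abs (addr : Int) (out : Option String) : Prop := out = resolve_abs_alt addr
instance (addr : Int) (out : Option String) : Decidable (Spec_resolve_abs addr out) := by unfold Spec_resolve_abs; infer_instance

-- ===== CLAIM (what is proved, stated in full; the proofs are below) =====
def Claim_equal_resolve_abs : Prop := ∀ (addr : Int), Dom_resolve_abs addr → Spec_resolve_abs addr (resolve_abs addr)

-- ===== LEMMAS AND PROOFS =====

-- the two bands around the base clusters, where the answer can be non-None, checked value by value
set_option maxRecDepth 100000 in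
set_option maxHeartbeats 1000000 in
theorem band1 : ((List.range 350).all
    (fun k => resolve_abs (511 + k) == resolve_abs_alt (511 + k))) = true := by
  decide

set_option maxRecDepth 100000 in
set_option maxHeartbeats 2000000 in
theorem band2 : ((List.range 1168).all
    (fun k => resolve_abs (4095 + k) == resolve_abs_alt (4095 + k))) = true := by
  decide

theorem foldl_fixed (addr : Int) (l : List (Int × String)) (s : Option Int × Option Int)
    (h : ∀ p ∈ l, aStep addr s p = s) : l.foldl (aStep addr) s = s := by
  induction l with
  | nil => rfl
  | cons p t ih =>
    simp only [List.foldl_cons, h p (by simp)]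
    exact ih (fun q hq => h q (by simp [hq]))

theorem keys_eq : absBases.keys =
    [512, 828, 4096, 4097, 4862, 4889, 4903, 4904, 4913, 4914,
     4923, 4934, 5062, 5189, 5199, 5209, 5211, 5219, 5221, 5230] := by decide

theorem sorted_items : PySem.List.sorted absBases.items (fun p => p.1) false = absBases.items := by
  decide

theorem sortedBases_eq : sortedBases = absBases.keys := by
  unfold sortedBases
  exact PySem.List.sorted_eq_self_of_pairwise absBases.keys (fun x => x) (by decide)

theorem go_step (addr : Int) (fuel lo hi : Nat) (h : lo < hi) :
    bsearchGo addr (fuel + 1) lo hi =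
      if sortedBases.getD ((lo + hi) / 2) 0 ≤ addr then bsearchGo addr fuel ((lo + hi) / 2 + 1) hi
      else bsearchGo addr fuel lo ((lo + hi) / 2) := by
  show (if lo < hi then
      if sortedBases.getD ((lo + hi) / 2) 0 ≤ addr then bsearchGo addr fuel ((lo + hi) / 2 + 1) hi
      else bsearchGo addr fuel lo ((lo + hi) / 2)
    else lo) = _
  rw [if_pos h]

theorem go_stop (addr : Int) (fuel lo hi : Nat) (h : ¬ lo < hi) :
    bsearchGo addr (fuel + 1) lo hi = lo := by
  show (if lo < hi then
      if sortedBases.getD ((lo + hi) / 2) 0 ≤ addr then bsearchGo addr fuel ((lo + hi) / 2 + 1) hi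
      else bsearchGo addr fuel lo ((lo + hi) / 2)
    else lo) = lo
  rw [if_neg h]

-- A returns None whenever addr is not a key, every base is above addr or more than 32 below it,
-- and addr is not 1 below a base
theorem a_none (addr : Int)
    (h : ∀ k ∈ absBases.keys, (addr < k ∨ 32 < addr - k) ∧ addr ≠ k - 1) :
    resolve_abs addr = none := by
  have hnc : absBases.contains addr = false := by
    rw [PySem.Dict.contains_eq_decide_mem_keys]
    simp only [decide_eq_false_iff_not]
    intro hmem
    rcases h addr hmem with ⟨h1, _⟩
    omega
  have hfold : absBases.items.foldl (aStep addr) (none, none) = (none, none) := by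
    apply foldl_fixed
    intro p hp
    rcases h p.1 (PySem.Dict.mem_keys_of_mem_items _ hp) with ⟨h1, _⟩
    rcases h1 with h1 | h1
    · have h2 : ¬ p.1 ≤ addr := by omega
      simp [aStep, h2]
    · have h2 : p.1 ≤ addr := by omega
      have h3 : ¬ addr - p.1 ≤ 32 := by omega
      simp [aStep, h2, h3]
  unfold resolve_abs
  rw [hnc, sorted_items]
  rw [if_neg (by simp), hfold]
  unfold aNegScan
  rw [List.findSome?_eq_none_iff.mpr]
  intro p hp
  rcases h p.1 (PySem.Dict.mem_keys_of_mem_items _ hp) with ⟨_, h2⟩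
  simp [h2]

theorem bNeg_none (addr : Int) (h : addr + 1 ∉ absBases.keys) : bNegCheck addr = none := by
  unfold bNegCheck
  rw [PySem.Dict.contains_eq_decide_mem_keys]
  simp [h]

theorem get?_none (addr : Int) (h : addr ∉ absBases.keys) : absBases.get? addr = none := by
  rw [PySem.Dict.get?_eq_none_iff_not_mem_keys]; exact h

theorem getD_sortedBases (m : Nat) (_hm : m < 20) :
    sortedBases.getD m 0 =
      [(512:Int), 828, 4096, 4097, 4862, 4889, 4903, 4904, 4913, 4914,
       4923, 4934, 5062, 5189, 5199, 5209, 5211, 5219, 5221, 5230].getD m 0 := by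
  rw [sortedBases_eq, keys_eq]

theorem len_sortedBases : sortedBases.length = 20 := by rw [sortedBases_eq, keys_eq]; rfl

theorem bsearch_low (addr : Int)
    (h : ∀ m, m < sortedBases.length → ¬ sortedBases.getD m 0 ≤ addr) :
    ∀ fuel lo hi, hi ≤ sortedBases.length → bsearchGo addr fuel lo hi = lo := by
  intro fuel
  induction fuel with
  | zero => intro lo hi _; rfl
  | succ fuel ih =>
    intro lo hi hh
    unfold bsearchGo
    by_cases hlt : lo < hi
    · rw [if_pos hlt, if_neg (h ((lo + hi) / 2) (by omega))]
      exact ih lo ((lo + hi) / 2) (by omega)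
    · rw [if_neg hlt]

theorem bsearch_high (addr : Int)
    (h : ∀ m, m < sortedBases.length → sortedBases.getD m 0 ≤ addr) :
    ∀ fuel lo hi, hi - lo ≤ fuel → lo ≤ hi → hi ≤ sortedBases.length →
      bsearchGo addr fuel lo hi = hi := by
  intro fuel
  induction fuel with
  | zero => intro lo hi hf hle _; unfold bsearchGo; omega
  | succ fuel ih =>
    intro lo hi hf hle hh
    unfold bsearchGo
    by_cases hlt : lo < hi
    · rw [if_pos hlt, if_pos (h ((lo + hi) / 2) (by omega))]
      exact ih ((lo + hi) / 2 + 1) hi (by omega) (by omega) hh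
    · rw [if_neg hlt]; omega

theorem low_none (addr : Int) (h : addr ≤ 510) :
    resolve_abs addr = none ∧ resolve_abs_alt addr = none := by
  have hkeys := keys_eq
  constructor
  · exact a_none addr (by rw [hkeys]; intro k hk; simp at hk; omega)
  · unfold resolve_abs_alt
    rw [get?_none addr (by rw [hkeys]; simp; omega)]
    have hb : bsearchLoop addr 0 sortedBases.length = 0 := by
      unfold bsearchLoop
      refine bsearch_low addr ?_ _ 0 _ (le_refl _)
      intro m hm
      have hm20 : m < 20 := len_sortedBases ▸ hm
      rw [getD_sortedBases m hm20]
      interval_cases m <;> simp [List.getD] <;> omega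
    simp only [hb]
    rw [if_neg (by omega)]
    exact bNeg_none addr (by rw [hkeys]; simp; omega)

theorem high_none (addr : Int) (h : 5263 ≤ addr) :
    resolve_abs addr = none ∧ resolve_abs_alt addr = none := by
  have hkeys := keys_eq
  constructor
  · exact a_none addr (by rw [hkeys]; intro k hk; simp at hk; omega)
  · unfold resolve_abs_alt
    rw [get?_none addr (by rw [hkeys]; simp; omega)]
    have hb : bsearchLoop addr 0 sortedBases.length = 20 := by
      unfold bsearchLoop
      rw [len_sortedBases]
      show bsearchGo addr 20 0 20 = 20
      apply bsearch_high addr _ 20 0 20 (by omega) (by omega) (by rw [len_sortedBases])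
      intro m hm
      have hm20 : m < 20 := len_sortedBases ▸ hm
      rw [getD_sortedBases m hm20]
      interval_cases m <;> simp [List.getD] <;> omega
    simp only [hb]
    rw [if_pos (by omega)]
    rw [getD_sortedBases (20 - 1) (by omega)]
    rw [if_neg (by simp [List.getD]; omega)]
    exact bNeg_none addr (by rw [hkeys]; simp; omega)

-- the gap between the two base clusters: the binary search follows one concrete path
theorem gap_none (addr : Int) (hlo : 861 ≤ addr) (hhi : addr ≤ 4094) :
    resolve_abs addr = none ∧ resolve_abs_alt addr = none := by
  have hkeys := keys_eq
  constructor
  · exact a_none addr (by rw [hkeys]; intro k hk; simp at hk; omega)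
  · unfold resolve_abs_alt
    rw [get?_none addr (by rw [hkeys]; simp; omega)]
    have hb : bsearchLoop addr 0 sortedBases.length = 2 := by
      unfold bsearchLoop
      rw [len_sortedBases]
      show bsearchGo addr 20 0 20 = 2
      have e1 : bsearchGo addr 20 0 20 = bsearchGo addr 19 0 10 := by
        rw [show (20:Nat) = 19 + 1 from rfl, go_step addr 19 0 20 (by omega),
            show ((0 + 20) / 2 : Nat) = 10 from rfl,
            getD_sortedBases 10 (by omega), if_neg (by simp [List.getD]; omega)]
      have e2 : bsearchGo addr 19 0 10 = bsearchGo addr 18 0 5 := by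
        rw [show (19:Nat) = 18 + 1 from rfl, go_step addr 18 0 10 (by omega),
            show ((0 + 10) / 2 : Nat) = 5 from rfl,
            getD_sortedBases 5 (by omega), if_neg (by simp [List.getD]; omega)]
      have e3 : bsearchGo addr 18 0 5 = bsearchGo addr 17 0 2 := by
        rw [show (18:Nat) = 17 + 1 from rfl, go_step addr 17 0 5 (by omega),
            show ((0 + 5) / 2 : Nat) = 2 from rfl,
            getD_sortedBases 2 (by omega), if_neg (by simp [List.getD]; omega)]
      have e4 : bsearchGo addr 17 0 2 = bsearchGo addr 16 2 2 := by
        rw [show (17:Nat) = 16 + 1 from rfl, go_step addr 16 0 2 (by omega),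
            show ((0 + 2) / 2 : Nat) = 1 from rfl,
            getD_sortedBases 1 (by omega), if_pos (by simp [List.getD]; omega)]
      have e5 : bsearchGo addr 16 2 2 = 2 := by
        rw [show (16:Nat) = 15 + 1 from rfl, go_stop addr 15 2 2 (by omega)]
      rw [e1, e2, e3, e4, e5]
    simp only [hb]
    rw [if_pos (by omega)]
    rw [getD_sortedBases (2 - 1) (by omega)]
    rw [if_neg (by simp [List.getD]; omega)]
    exact bNeg_none addr (by rw [hkeys]; simp; omega)

theorem band_eq (base n : Int) (k : Nat)
    (hall : ((List.range k).all
      (fun k => resolve_abs (base + k) == resolve_abs_alt (base + k))) = true)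
    (h1 : base ≤ n) (h2 : n < base + k) : resolve_abs n = resolve_abs_alt n := by
  have hk : (n - base).toNat < k := by omega
  have := List.all_eq_true.mp hall ((n - base).toNat) (List.mem_range.mpr hk)
  rw [beq_iff_eq] at this
  have heq : n = base + ((n - base).toNat : Int) := by omega
  rw [heq]
  exact this

-- ===== VERDICT (by name: the statement is the Claim_ definition above) =====
theorem resolve_abs_spec : Claim_equal_resolve_abs := by
  intro addr _
  unfold Spec_resolve_abs
  by_cases h : addr < 511
  · rw [(low_none addr (by omega)).1, (low_none addr (by omega)).2]
  · by_cases h2 : addr < 861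
    · exact band_eq 511 addr 350 band1 (by omega) (by omega)
    · by_cases h3 : addr < 4095
      · rw [(gap_none addr (by omega) (by omega)).1, (gap_none addr (by omega) (by omega)).2]
      · by_cases h4 : addr < 5263
        · exact band_eq 4095 addr 1168 band2 (by omega) (by omega)
        · rw [(high_none addr (by omega)).1, (high_none addr (by omega)).2]
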